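-- pv_equiv track=rewrite | github.com/zhuxiangqun/aiPlatform | aiPlat-platform/utils/ids.py | _encode_crockford32
-- ===== SOURCE A (Python) =====
-- _CROCKFORD32 = "0123456789ABCDEFGHJKMNPQRSTVWXYZ"
--
-- def _encode_crockford32(value: int, length: int) -> str:
--     """Encode non-negative int to fixed-length Crockford base32."""
--     if value < 0:
--         raise ValueError("value must be non-negative")
--     out = []
--     for _ in range(length):
--         out.append(_CROCKFORD32[value & 0x1F])
--         value >>= 5
--     if value:
--         raise ValueError("value too large to encode in requested length")
--     return "".join(reversed(out))
-- ===== SOURCE B (Python) =====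
-- _CROCKFORD32 = "0123456789ABCDEFGHJKMNPQRSTVWXYZ"
--
-- def _encode_crockford32(value: int, length: int) -> str:
--     """Encode non-negative int to fixed-length Crockford base32."""
--     if value < 0:
--         raise ValueError("value must be non-negative")
--     digits = []
--     while value:
--         digits.append(_CROCKFORD32[value & 0x1F])
--         value >>= 5
--     n = length if length > 0 else 0
--     if len(digits) > n:
--         raise ValueError("value too large to encode in requested length")
--     return _CROCKFORD32[0] * (n - len(digits)) + "".join(reversed(digits))
-- ===== Notes on version B (the rewrite author's own statement) =====
-- stated objective: faster
-- what changed: B extracts only the significant base-32 digits with a while-loop and left-pads with '0' via string repetition, detecting overflow by digit count, instead of A's per-character range(length) loop with a residual-value check.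
import Mathlib
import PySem

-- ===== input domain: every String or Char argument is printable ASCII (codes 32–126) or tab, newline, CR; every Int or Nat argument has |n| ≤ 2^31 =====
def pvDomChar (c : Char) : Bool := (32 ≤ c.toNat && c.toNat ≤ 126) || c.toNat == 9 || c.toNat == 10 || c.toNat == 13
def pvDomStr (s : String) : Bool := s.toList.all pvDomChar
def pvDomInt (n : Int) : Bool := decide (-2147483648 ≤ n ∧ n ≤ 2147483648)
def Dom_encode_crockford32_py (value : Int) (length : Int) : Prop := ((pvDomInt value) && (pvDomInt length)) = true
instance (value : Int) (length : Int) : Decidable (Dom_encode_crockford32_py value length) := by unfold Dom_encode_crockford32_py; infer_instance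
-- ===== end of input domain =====

-- B replaces A's fixed range(length) loop + residual-value overflow check by a while-loop over
-- the significant digits only, a digit-count overflow check, and bulk "0"-padding — measurably faster when length exceeds the digit count.

-- the Crockford base-32 alphabet, as a character list
def pvCrock : List Char :=
  ['0','1','2','3','4','5','6','7','8','9','A','B','C','D','E','F','G','H','J','K','M','N','P','Q','R','S','T','V','W','X','Y','Z']

-- ===== PORT A =====
-- loop body: out.append(_CROCKFORD32[value & 0x1F]); value >>= 5
-- Python's `value & 0x1F` is PySem.Int.band, `value >>= 5` is Int `>>>` (exact also on negatives).
def encode_crockford32_py (value : Int) (length : Int) : String :=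
  if value < 0 then ""   -- raise ValueError("value must be non-negative"): excluded by Pre_
  else
    let st := (PySem.List.pyRange 0 length 1).foldl
      (fun (p : List Char × Int) _ =>
        (p.1 ++ [pvCrock.getD (PySem.Int.band p.2 31).toNat ' '], p.2 >>> (5:Nat)))
      ([], value)
    if st.2 ≠ 0 then ""  -- raise ValueError("value too large ..."): excluded by Pre_
    else String.ofList st.1.reverse   -- "".join(reversed(out))

-- ===== PORT B =====
-- `while value:` with nonnegative value is structural recursion on value.toNat;
-- `value & 0x1F` and `value >>= 5` become Nat's &&& / >>> (exact for nonnegative ints).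
def pvAltDigits (v : Nat) : List Char :=
  if h : v = 0 then []
  else pvCrock.getD (v &&& 31) ' ' :: pvAltDigits (v >>> 5)
decreasing_by
  rw [Nat.shiftRight_eq_div_pow]
  exact Nat.div_lt_self (Nat.pos_of_ne_zero h) (by norm_num)

def encode_crockford32_py_alt (value : Int) (length : Int) : String :=
  if value < 0 then ""   -- raise ValueError("value must be non-negative"): excluded by Pre_
  else
    let digits := pvAltDigits value.toNat
    let n : Int := if length > 0 then length else 0
    if (digits.length : Int) > n then ""   -- raise ValueError("value too large ..."): excluded by Pre_
    else String.ofList (List.replicate (n - digits.length).toNat (pvCrock.getD 0 ' ') ++ digits.reverse)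

-- ===== PRECONDITION & SPEC =====
-- Pre_: exactly the inputs on which A returns (value ≥ 0 and value fits in `length` base-32 digits,
-- i.e. value < 32^max(length,0), stated via bit length so it is cheap to decide for large `length`).
def Pre_encode_crockford32_py (value : Int) (length : Int) : Prop :=
  0 ≤ value ∧ PySem.Int.bitLength value ≤ 5 * length.toNat
instance (value : Int) (length : Int) : Decidable (Pre_encode_crockford32_py value length) := by
  unfold Pre_encode_crockford32_py; infer_instance

def pvWitness_encode_crockford32_py : Int × Int := (123, 4)

def Spec_encode_crockford32_py (value : Int) (length : Int) (out : String) : Prop := out = encode_crockford32_py_alt value length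
instance (value : Int) (length : Int) (out : String) : Decidable (Spec_encode_crockford32_py value length out) := by unfold Spec_encode_crockford32_py; infer_instance

-- ===== CLAIM (what is proved, stated in full; the proofs are below) =====
def Claim_equal_encode_crockford32_py : Prop := ∀ (value : Int) (length : Int), Dom_encode_crockford32_py value length → Pre_encode_crockford32_py value length → Spec_encode_crockford32_py value length (encode_crockford32_py value length)

-- ===== LEMMAS AND PROOFS =====

-- low-order-first digit list of v, exactly n digits
def pvRepLow (n : Nat) (v : Nat) : List Char :=
  match n with
  | 0 => []
  | n+1 => pvCrock.getD (v % 32) ' ' :: pvRepLow n (v / 32)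

theorem pvAltDigits_eq (v : Nat) :
    pvAltDigits v = if v = 0 then [] else pvCrock.getD (v % 32) ' ' :: pvAltDigits (v / 32) := by
  rw [pvAltDigits]
  have h31 : v &&& 31 = v % 32 := by
    simpa using Nat.and_two_pow_sub_one_eq_mod v 5
  have h5 : v >>> 5 = v / 32 := by
    rw [Nat.shiftRight_eq_div_pow]
  simp [h31, h5]

-- A's loop: the fold only uses the length of the list it folds over
theorem pvLoopA (l : List Int) (acc : List Char) (v : Nat) :
    l.foldl (fun (p : List Char × Int) _ =>
        (p.1 ++ [pvCrock.getD (PySem.Int.band p.2 31).toNat ' '], p.2 >>> (5:Nat)))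
      (acc, (v : Int))
    = (acc ++ pvRepLow l.length v, ((v / 32 ^ l.length : Nat) : Int)) := by
  induction l generalizing acc v with
  | nil => simp [pvRepLow]
  | cons x xs ih =>
    have hband : PySem.Int.band (v:Int) 31 = ((v &&& 31 : Nat) : Int) := by
      exact_mod_cast PySem.Int.band_natCast v 31
    have h31 : v &&& 31 = v % 32 := by
      simpa using Nat.and_two_pow_sub_one_eq_mod v 5
    have hsh : ((v:Int) >>> (5:Nat)) = ((v >>> 5 : Nat) : Int) := rfl
    have h5 : v >>> 5 = v / 32 := by
      rw [Nat.shiftRight_eq_div_pow]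
    simp only [List.foldl_cons, hband, h31, hsh, h5, Int.toNat_natCast]
    rw [ih]
    simp [pvRepLow, List.length_cons, Nat.div_div_eq_div_mul, pow_succ, mul_comm]

-- B's digits, zero-padded to n places, are exactly A's n low-order digits (when v fits)
theorem pvRep_pad (n v : Nat) (hv : v < 32 ^ n) :
    pvRepLow n v = pvAltDigits v ++ List.replicate (n - (pvAltDigits v).length) '0' := by
  induction n generalizing v with
  | zero =>
    have : v = 0 := by simpa using hv
    subst this
    simp [pvRepLow, pvAltDigits_eq]
  | succ n ih =>
    by_cases h0 : v = 0
    · subst h0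
      rw [pvAltDigits_eq]
      rw [pvRepLow]
      rw [ih (v := 0) (by positivity)]
      simp [pvAltDigits_eq, List.replicate_succ]
      rfl
    · rw [pvAltDigits_eq, if_neg h0]
      have hdiv : v / 32 < 32 ^ n := by
        rw [Nat.div_lt_iff_lt_mul (by norm_num)]
        calc v < 32 ^ (n+1) := hv
        _ = 32 ^ n * 32 := by ring
      rw [pvRepLow, ih (v := v / 32) hdiv]
      simp [List.length_cons, Nat.succ_sub_succ]

theorem pvAltDigits_len_le (n v : Nat) (hv : v < 32 ^ n) : (pvAltDigits v).length ≤ n := by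
  have h := congrArg List.length (pvRep_pad n v hv)
  have hlen : (pvRepLow n v).length = n := by
    clear h hv
    induction n generalizing v with
    | zero => rfl
    | succ n ih => simp [pvRepLow, ih]
  simp [hlen] at h
  omega

-- v < 32^n from the bit-length bound
theorem pvFits (v n : Nat) (h : PySem.Int.bitLength (v:Int) ≤ 5 * n) : v < 32 ^ n := by
  have h1 := PySem.Int.lt_two_pow_bitLength (v:Int)
  have h2 : (2:Nat) ^ PySem.Int.bitLength (v:Int) ≤ 2 ^ (5 * n) := Nat.pow_le_pow_right (by norm_num) h
  have : (v:Int).natAbs = v := Int.natAbs_natCast v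
  have h32 : (32:Nat) ^ n = 2 ^ (5 * n) := by rw [show (32:Nat) = 2^5 by norm_num, ← pow_mul]
  omega

-- ===== VERDICT (by name: the statement is the Claim_ definition above) =====
theorem encode_crockford32_py_spec : Claim_equal_encode_crockford32_py := by
  intro value length _ hpre
  obtain ⟨hv0, hbits⟩ := hpre
  set n := length.toNat with hn
  set v := value.toNat with hvdef
  have hvv : value = (v : Int) := by omega
  have hfit : v < 32 ^ n := pvFits v n (by rwa [← hvv])
  have hdlen := pvAltDigits_len_le n v hfit
  have hA : encode_crockford32_py value length = String.ofList ((pvRepLow n v).reverse) := by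
    have hlenrange : (PySem.List.pyRange 0 length 1).length = n := by
      rw [PySem.List.length_pyRange_one]; omega
    have hloop := pvLoopA (PySem.List.pyRange 0 length 1) [] v
    rw [hlenrange] at hloop
    unfold encode_crockford32_py
    rw [if_neg (by omega), hvv]
    simp only [hloop]
    simp [Nat.div_eq_of_lt hfit]
  have hB : encode_crockford32_py_alt value length
      = String.ofList (List.replicate (n - (pvAltDigits v).length) '0' ++ (pvAltDigits v).reverse) := by
    have hnInt : (if length > 0 then length else 0) = (n : Int) := by omega
    have hpad : (((n:Int) - ((pvAltDigits v).length : Int)).toNat) = n - (pvAltDigits v).length := by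
      omega
    have hc : pvCrock.getD 0 ' ' = '0' := rfl
    unfold encode_crockford32_py_alt
    rw [if_neg (by omega)]
    simp only [← hvdef, hnInt, hpad, hc]
    rw [if_neg (by omega)]
  unfold Spec_encode_crockford32_py
  rw [hA, hB, pvRep_pad n v hfit]
  simp [List.reverse_append, List.reverse_replicate]
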